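-- pv_equiv track=rewrite | github.com/zxcvbnmzsedr/skills | textum/scripts/textum/prd/prd_slices_utils.py | id_range
-- ===== SOURCE A (Python) =====
-- from typing import Any, Callable, Iterable
--
-- def id_range(ids: Iterable[str]) -> tuple[str | None, str | None]:
--     first: str | None = None
--     last: str | None = None
--     for item_id in ids:
--         if first is None:
--             first = item_id
--         last = item_id
--     return first, last
-- ===== SOURCE B (Python) =====
-- def id_range(ids):
--     lst = list(ids)
--     return (lst[0], lst[-1]) if lst else (None, None)
-- ===== Notes on version B (the rewrite author's own statement) =====
-- stated objective: simpler
-- what changed: Replaces the streaming loop with first/last state by materializing the iterable and indexing its endpoints.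
import Mathlib
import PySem

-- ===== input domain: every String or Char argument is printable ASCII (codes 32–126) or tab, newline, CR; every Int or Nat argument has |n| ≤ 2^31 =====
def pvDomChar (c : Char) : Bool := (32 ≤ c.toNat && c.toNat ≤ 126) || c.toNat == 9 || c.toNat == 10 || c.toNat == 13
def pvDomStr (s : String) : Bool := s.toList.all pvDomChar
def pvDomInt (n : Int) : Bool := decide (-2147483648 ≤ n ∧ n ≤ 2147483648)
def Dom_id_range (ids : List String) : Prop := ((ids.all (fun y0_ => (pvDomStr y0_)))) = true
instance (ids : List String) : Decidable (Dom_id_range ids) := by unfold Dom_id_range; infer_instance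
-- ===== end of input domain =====

-- B materializes the iterable and indexes its endpoints instead of tracking first/last in a loop (simpler).


-- ===== PORT A =====
-- literal port: fold over the list carrying (first, last) state
def id_range (ids : List String) : Option String × Option String :=
  ids.foldl (fun (st : Option String × Option String) item_id =>
    ((if st.1 = none then some item_id else st.1), some item_id))
    (none, none)

-- ===== PORT B =====
-- literal port of Source B: index the endpoints of the materialized list
def id_range_alt (ids : List String) : Option String × Option String :=
  if ids ≠ [] then (PySem.List.pyGet? ids 0, PySem.List.pyGet? ids (-1))
  else (none, none)

-- ===== PRECONDITION & SPEC =====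
def Spec_id_range (ids : List String) (out : Option String × Option String) : Prop := out = id_range_alt ids
instance (ids : List String) (out : Option String × Option String) : Decidable (Spec_id_range ids out) := by unfold Spec_id_range; infer_instance

-- ===== CLAIM (what is proved, stated in full; the proofs are below) =====
def Claim_equal_id_range : Prop := ∀ (ids : List String), Dom_id_range ids → Spec_id_range ids (id_range ids)

-- ===== LEMMAS AND PROOFS =====
-- invariant: once first is some, the fold keeps it and returns (first, last of list or seed last)
theorem id_range_foldl_some (ids : List String) (f l : String) :
    ids.foldl (fun (st : Option String × Option String) item_id =>
      ((if st.1 = none then some item_id else st.1), some item_id))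
      (some f, some l) = (some f, some (ids.getLast?.getD l)) := by
  induction ids generalizing l with
  | nil => simp
  | cons x xs ih =>
    rw [List.foldl_cons]
    have hstep : ((if (some f, some l).1 = none then some x else (some f, some l).1, some x)
        : Option String × Option String) = (some f, some x) := by simp
    rw [hstep, ih x]
    cases xs with
    | nil => simp
    | cons y ys => simp [List.getLast?_cons, List.getLastD_eq_getLast?]

-- ===== VERDICT (by name: the statement is the Claim_ definition above) =====
theorem id_range_spec : Claim_equal_id_range := by
  intro ids _
  unfold Spec_id_range id_range id_range_alt
  cases ids with
  | nil => simp
  | cons x xs =>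
    simp only [List.foldl_cons, reduceIte, id_range_foldl_some]
    simp [PySem.List.pyGet?, PySem.List.pyIdx?]
    cases h : xs.getLast? with
    | none => simp [List.getLast?_eq_none_iff.mp h]
    | some y =>
      have hx : (x :: xs).getLast? = some y := by
        cases xs with
        | nil => simp at h
        | cons z zs => simpa [List.getLast?_cons_cons] using h
      have h2 : (x :: xs)[xs.length]? = some y := by
        simpa [List.getLast?_eq_getElem?] using hx
      obtain ⟨hlt, hv⟩ := List.getElem?_eq_some_iff.mp h2
      exact hv.symm
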